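-- pv_equiv track=rewrite | github.com/bglossner/Python-Calculator | Calculator/calculator.py | findExclusiveIndex
-- ===== SOURCE A (Python) =====
-- def findExclusiveIndex(str):
--     opCompStr = "+-*/^"
--     tempList = []
--     for i, char in enumerate(str):
--         if char in opCompStr:
--             if len(tempList) == 1:
--                 return i
--             else:
--                 tempList.append(i)
--     return tempList[0]
-- ===== SOURCE B (Python) =====
-- def findExclusiveIndex(str):
--     ops = "+-*/^"
--     first = min(i for i in (str.find(c) for c in ops) if i >= 0)
--     later = [i for i in (str.find(c, first + 1) for c in ops) if i >= 0]
--     return min(later) if later else first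
-- ===== Notes on version B (the rewrite author's own statement) =====
-- stated objective: alternative
-- what changed: Instead of A's single positional pass that accumulates seen operator indices in a list, B asks str.find for each of the five operator characters and takes the minimum index, then repeats the per-character finds starting after that index and takes the minimum again (falling back to the first index).
import Mathlib
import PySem

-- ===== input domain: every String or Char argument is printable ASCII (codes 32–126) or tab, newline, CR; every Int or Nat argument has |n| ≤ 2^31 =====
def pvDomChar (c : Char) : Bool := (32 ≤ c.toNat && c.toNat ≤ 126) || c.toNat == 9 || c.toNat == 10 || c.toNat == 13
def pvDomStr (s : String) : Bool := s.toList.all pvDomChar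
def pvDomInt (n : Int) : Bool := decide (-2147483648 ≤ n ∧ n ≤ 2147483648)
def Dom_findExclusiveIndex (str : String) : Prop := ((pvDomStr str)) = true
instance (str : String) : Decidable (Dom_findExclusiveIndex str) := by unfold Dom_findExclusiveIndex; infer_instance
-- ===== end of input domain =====

-- B replaces A's single positional pass (which accumulates seen operator indices in a list)
-- by per-operator-character str.find + min, repeated once after the first operator; objective: alternative.

-- the operator characters of "+-*/^"
def pvOps : List Char := ['+', '-', '*', '/', '^']

-- ===== PORT A =====
-- A's loop over enumerate(str): `i` is the running index, `temp` is tempList.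
-- `none` = the final `tempList[0]` raised IndexError (no operator in the string).
def goA (l : List Char) (i : Nat) (temp : List Int) : Option Int :=
  match l with
  | [] => PySem.List.pyGet? temp 0
  | c :: rest =>
      if c ∈ pvOps then
        if temp.length == 1 then some (Int.ofNat i)
        else goA rest (i + 1) (temp ++ [Int.ofNat i])
      else goA rest (i + 1) temp

def findExclusiveIndex (str : String) : Int :=
  (goA str.toList 0 []).getD 0

-- ===== PORT B =====
def findExclusiveIndex_alt (str : String) : Int :=
  -- first = min(i for i in (str.find(c) for c in ops) if i >= 0)
  let firsts := (pvOps.map (fun c => PySem.Str.find str (String.ofList [c]))).filter (fun i => decide (0 ≤ i))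
  match PySem.List.min? firsts (fun x => x) with
  | none => 0  -- Python's min raises ValueError here (no operator); unreachable under Pre_
  | some first =>
    -- later = [i for i in (str.find(c, first + 1) for c in ops) if i >= 0]
    let later := (pvOps.map (fun c => PySem.Str.findFrom str (String.ofList [c]) (first + 1))).filter (fun i => decide (0 ≤ i))
    -- return min(later) if later else first
    match PySem.List.min? later (fun x => x) with
    | none => first
    | some s => s

-- ===== PRECONDITION & SPEC =====
-- Pre_ excludes strings with no operator character: there A raises IndexError (and B raises ValueError).
def Pre_findExclusiveIndex (str : String) : Prop := (str.toList.any (fun c => c ∈ pvOps)) = true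
instance (str : String) : Decidable (Pre_findExclusiveIndex str) := by
  unfold Pre_findExclusiveIndex; infer_instance
def pvWitness_findExclusiveIndex : String := "1+2*3"

def Spec_findExclusiveIndex (str : String) (out : Int) : Prop := out = findExclusiveIndex_alt str
instance (str : String) (out : Int) : Decidable (Spec_findExclusiveIndex str out) := by
  unfold Spec_findExclusiveIndex; infer_instance

-- ===== CLAIM (what is proved, stated in full; the proofs are below) =====
def Claim_equal_findExclusiveIndex : Prop := ∀ (str : String), Dom_findExclusiveIndex str → Pre_findExclusiveIndex str → Spec_findExclusiveIndex str (findExclusiveIndex str)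

-- ===== LEMMAS AND PROOFS =====

-- index of the FIRST operator character of l, if any (spec-side helper)
def findOp0 (l : List Char) : Option Nat :=
  match l with
  | [] => none
  | c :: rest => if c ∈ pvOps then some 0 else (findOp0 rest).map (· + 1)

theorem findOp0_none (l : List Char) (h : findOp0 l = none) : ∀ c ∈ l, c ∉ pvOps := by
  induction l with
  | nil => simp
  | cons c rest ih =>
      by_cases hc : c ∈ pvOps
      · simp [findOp0, hc] at h
      · simp only [findOp0, if_neg hc, Option.map_eq_none_iff] at h
        intro d hd
        rcases List.mem_cons.mp hd with rfl | hd'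
        · exact hc
        · exact ih h d hd'

theorem findOp0_some (l : List Char) (f : Nat) (h : findOp0 l = some f) :
    (∃ c, l[f]? = some c ∧ c ∈ pvOps) ∧ ∀ j c, j < f → l[j]? = some c → c ∉ pvOps := by
  induction l generalizing f with
  | nil => simp [findOp0] at h
  | cons c rest ih =>
      by_cases hc : c ∈ pvOps
      · simp [findOp0, hc] at h
        subst h
        exact ⟨⟨c, by simp, hc⟩, by omega⟩
      · simp only [findOp0, if_neg hc, Option.map_eq_some_iff] at h
        obtain ⟨g, hg, rfl⟩ := h
        obtain ⟨⟨d, hd, hdops⟩, hmin⟩ := ih g hg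
        refine ⟨⟨d, by simpa using hd, hdops⟩, ?_⟩
        intro j e hj he
        cases j with
        | zero =>
            simp at he
            subst he
            exact hc
        | succ j' => exact hmin j' e (by omega) (by simpa using he)

-- singleton prefix = head
theorem singleton_prefix_iff (c : Char) (l : List Char) : [c] <+: l ↔ l.head? = some c := by
  constructor
  · rintro ⟨t, rfl⟩; rfl
  · intro h
    cases l with
    | nil => simp at h
    | cons d t => simp at h; exact ⟨t, by simp [h]⟩

theorem singleton_prefix_drop (c : Char) (l : List Char) (i : Nat) :
    [c] <+: l.drop i ↔ l[i]? = some c := by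
  rw [singleton_prefix_iff, List.head?_drop]

theorem singleton_infix_iff (c : Char) (l : List Char) : [c] <:+: l ↔ c ∈ l := by
  constructor
  · intro h; exact h.mem (by simp)
  · intro h
    obtain ⟨s, t, rfl⟩ := List.append_of_mem h
    exact ⟨s, t, by simp⟩

-- PySem find for a single character: -1 iff absent, else the first index holding c
theorem find_single_eq_neg_one (c : Char) (l : List Char) (h : c ∉ l) :
    PySem.Chars.find l [c] = -1 := by
  rw [PySem.Chars.find_eq_neg_one_iff]
  rw [singleton_infix_iff]; exact h

theorem find_single_spec (c : Char) (l : List Char) (h : 0 ≤ PySem.Chars.find l [c]) :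
    l[(PySem.Chars.find l [c]).toNat]? = some c ∧
      ∀ i < (PySem.Chars.find l [c]).toNat, l[i]? ≠ some c := by
  obtain ⟨h1, h2⟩ := PySem.Chars.find_spec (s := l) (sub := [c]) h
  refine ⟨(singleton_prefix_drop c l _).mp h1, ?_⟩
  intro i hi hcontra
  exact h2 i hi ((singleton_prefix_drop c l i).mpr hcontra)

-- KEY: the filtered per-character finds (shifted by k) have minimum = first operator index (+ k)
theorem min_find_shift (m : List Char) (k : Nat) :
    PySem.List.min?
      ((pvOps.map (fun c => if PySem.Chars.find m [c] = -1 then (-1 : Int)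
            else (k : Int) + PySem.Chars.find m [c])).filter (fun i => decide (0 ≤ i)))
      (fun x => x)
    = (findOp0 m).map (fun j => ((j + k : Nat) : Int)) := by
  cases hf : findOp0 m with
  | none =>
      have hnone : ∀ c ∈ m, c ∉ pvOps := findOp0_none m hf
      have : ((pvOps.map (fun c => if PySem.Chars.find m [c] = -1 then (-1 : Int)
            else (k : Int) + PySem.Chars.find m [c])).filter (fun i => decide (0 ≤ i))) = [] := by
        rw [List.filter_eq_nil_iff]
        intro x hx
        obtain ⟨c, hc, rfl⟩ := List.mem_map.mp hx
        have hcm : c ∉ m := fun hm => hnone c hm hc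
        simp [find_single_eq_neg_one c m hcm]
      rw [this]
      simp [PySem.List.min?]
  | some f =>
      obtain ⟨⟨c₀, hc₀, hc₀ops⟩, hmin⟩ := findOp0_some m f hf
      -- find m [c₀] = f
      have hc₀m : c₀ ∈ m := List.mem_of_getElem? hc₀
      have hpos : 0 ≤ PySem.Chars.find m [c₀] := by
        rw [PySem.Chars.find_nonneg_iff, singleton_infix_iff]; exact hc₀m
      obtain ⟨hg1, hg2⟩ := find_single_spec c₀ m hpos
      have hfind : PySem.Chars.find m [c₀] = (f : Int) := by
        have hge : f ≤ (PySem.Chars.find m [c₀]).toNat := by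
          by_contra hlt
          exact hmin _ c₀ (by omega) hg1 hc₀ops
        have hle : (PySem.Chars.find m [c₀]).toNat ≤ f := by
          by_contra hlt
          exact hg2 f (by omega) hc₀
        omega
      -- the candidate value f + k is in the filtered list
      set L := ((pvOps.map (fun c => if PySem.Chars.find m [c] = -1 then (-1 : Int)
            else (k : Int) + PySem.Chars.find m [c])).filter (fun i => decide (0 ≤ i))) with hL
      have hmem : ((f + k : Nat) : Int) ∈ L := by
        rw [hL, List.mem_filter]
        constructor
        · apply List.mem_map.mpr
          refine ⟨c₀, hc₀ops, ?_⟩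
          rw [hfind]
          have : (f : Int) ≠ -1 := by omega
          simp [this]; ring
        · simp only [decide_eq_true_eq]
          positivity
      -- every element of the filtered list is ≥ f + k
      have hlb : ∀ x ∈ L, ((f + k : Nat) : Int) ≤ x := by
        intro x hx
        rw [hL, List.mem_filter] at hx
        obtain ⟨hx1, hx2⟩ := hx
        obtain ⟨c, hcops, rfl⟩ := List.mem_map.mp hx1
        by_cases hneg : PySem.Chars.find m [c] = -1
        · simp [hneg] at hx2
        · simp only [if_neg hneg]
          have hcpos : 0 ≤ PySem.Chars.find m [c] := by
            have := PySem.Chars.neg_one_le_find (s := m) (sub := [c])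
            omega
          obtain ⟨hgi, _⟩ := find_single_spec c m hcpos
          have : f ≤ (PySem.Chars.find m [c]).toNat := by
            by_contra hlt
            exact hmin _ c (by omega) hgi hcops
          omega
      -- conclude
      cases hm : PySem.List.min? L (fun x => x) with
      | none =>
          rw [PySem.List.min?_eq_none_iff] at hm
          rw [hm] at hmem; simp at hmem
      | some v =>
          have hv1 := PySem.List.min?_mem (xs := L) (key := fun x => x) hm
          have hv2 : v ≤ ((f + k : Nat) : Int) :=
            PySem.List.min?_isMin (xs := L) (key := fun x => x) hm _ hmem
          have hv3 := hlb v hv1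
          simp only [Option.map_some]
          congr 1
          omega

-- A's loop: scanning with index offset, expressed through findOp0
-- goA with empty temp returns the second operator index or falls back to the first
theorem goA_one (l : List Char) (i f : Nat) :
    goA l i [Int.ofNat f] =
      some (Int.ofNat (((findOp0 l).map (· + i)).getD f)) := by
  induction l generalizing i with
  | nil => simp [goA, findOp0, PySem.List.pyGet?, PySem.List.pyIdx?]
  | cons c rest ih =>
      by_cases hc : c ∈ pvOps
      · simp [goA, findOp0, hc]
      · simp only [goA, findOp0, if_neg hc, ih (i + 1)]
        cases hrest : findOp0 rest with
        | none => simp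
        | some g => simp; omega

theorem goA_empty (l : List Char) (i : Nat) :
    goA l i [] =
      (findOp0 l).map (fun f =>
        Int.ofNat ((((findOp0 (l.drop (f + 1))).map (· + (f + i + 1))).getD (f + i)))) := by
  induction l generalizing i with
  | nil => simp [goA, findOp0, PySem.List.pyGet?, PySem.List.pyIdx?]
  | cons c rest ih =>
      by_cases hc : c ∈ pvOps
      · rw [show goA (c :: rest) i [] = goA rest (i + 1) [Int.ofNat i] from by
              simp [goA, hc]]
        rw [goA_one rest (i + 1) i]
        simp only [findOp0, if_pos hc, Option.map_some, List.drop_succ_cons, List.drop_zero]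
        cases hrest : findOp0 rest with
        | none => simp
        | some g => simp
      · simp only [goA, findOp0, if_neg hc, ih (i + 1)]
        cases hrest : findOp0 rest with
        | none => simp
        | some g =>
            have h2 : g + (i + 1) = g + 1 + i := by omega
            simp only [List.drop_succ_cons, Option.map_some, h2]

-- if some character of l is an operator, findOp0 finds one
theorem findOp0_isSome (l : List Char) (h : (l.any (fun c => c ∈ pvOps)) = true) :
    findOp0 l ≠ none := by
  intro hnone
  obtain ⟨c, hc, hop⟩ := List.any_eq_true.mp h
  exact findOp0_none l hnone c hc (by simpa using hop)

-- ===== VERDICT (by name: the statement is the Claim_ definition above) =====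
theorem findExclusiveIndex_spec : Claim_equal_findExclusiveIndex := by
  intro str _ hpre
  unfold Spec_findExclusiveIndex findExclusiveIndex findExclusiveIndex_alt
  rcases hfop : findOp0 str.toList with _ | f
  · exact absurd hfop (findOp0_isSome str.toList hpre)
  have hmap1 : pvOps.map (fun c => PySem.Chars.find str.toList [c])
      = pvOps.map (fun c => if PySem.Chars.find str.toList [c] = -1 then (-1 : Int)
            else ((0 : Nat) : Int) + PySem.Chars.find str.toList [c]) := by
    apply List.map_congr_left
    intro c _
    by_cases h : PySem.Chars.find str.toList [c] = -1 <;> simp [h]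
  have hmin1 := min_find_shift str.toList 0
  rw [hfop] at hmin1
  have hflen : f + 1 ≤ str.toList.length := by
    obtain ⟨⟨c₀, hc₀, _⟩, _⟩ := findOp0_some str.toList f hfop
    obtain ⟨hlt, -⟩ := List.getElem?_eq_some_iff.mp hc₀
    omega
  have hmap2 : pvOps.map (fun c => PySem.Chars.findFrom str.toList [c] ((f : Int) + 1))
      = pvOps.map (fun c => if PySem.Chars.find (str.toList.drop (f + 1)) [c] = -1 then (-1 : Int)
            else ((f + 1 : Nat) : Int) + PySem.Chars.find (str.toList.drop (f + 1)) [c]) := by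
    apply List.map_congr_left
    intro c _
    have hcast : ((f : Int) + 1) = (((f + 1 : Nat) : Int)) := by push_cast; ring
    rw [hcast]
    exact PySem.Chars.findFrom_natCast str.toList [c] (f + 1) hflen
  have hmin2 := min_find_shift (str.toList.drop (f + 1)) (f + 1)
  rw [goA_empty str.toList 0, hfop]
  simp only [Option.map_some, PySem.Str.find_eq, PySem.Str.findFrom_eq, String.toList_ofList]
  rw [hmap1, hmin1]
  simp only [Option.map_some, Nat.add_zero]
  rw [hmap2, hmin2]
  rcases findOp0 (str.toList.drop (f + 1)) with _ | j
  · simp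
  · simp
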